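-- pv_equiv track=rewrite | github.com/W25306/Algorithm | GM/solution.py | solution_25
-- ===== SOURCE A (Python) =====
-- def solution_25(n):
--     NOTATION = '0123'
--
--     def change(N):
--         q, r = divmod(N, 3)
--         n = NOTATION[r]
--         return change(q) + n if q else n
--
--     answer = change(n)
--     result = 0
--     for i, s in enumerate(answer):
--         result += 3 ** i * int(s)
--     return result
-- ===== SOURCE B (Python) =====
-- def solution_25(n):
--     result = 0
--     while n > 0:
--         n, r = divmod(n, 3)
--         result = result * 3 + r
--     return result
-- ===== Notes on version B (the rewrite author's own statement) =====
-- stated objective: simpler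
-- what changed: Replaced the MSB-first recursive base-3 string build plus a separate enumerate/3**i reweighting pass with a single iterative divmod loop that peels digits LSB-first and folds them as result*3+r, with no string and no powers.
import Mathlib
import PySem

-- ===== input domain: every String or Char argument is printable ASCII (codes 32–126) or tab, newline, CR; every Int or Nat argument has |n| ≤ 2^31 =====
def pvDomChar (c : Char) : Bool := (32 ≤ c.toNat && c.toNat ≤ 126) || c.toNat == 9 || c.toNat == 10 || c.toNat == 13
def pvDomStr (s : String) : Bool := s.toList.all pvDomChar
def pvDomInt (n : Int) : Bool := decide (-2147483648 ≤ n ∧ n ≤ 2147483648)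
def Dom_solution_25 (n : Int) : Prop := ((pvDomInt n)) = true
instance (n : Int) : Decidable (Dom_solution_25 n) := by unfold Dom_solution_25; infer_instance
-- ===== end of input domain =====

-- B replaces A's recursive base-3 string build + enumerate/3**i reweighting pass by a single
-- iterative divmod loop folding digits LSB-first as result*3+r (objective: simpler).

-- ===== PORT A =====
-- NOTATION = '0123' (as a char list; the string is only indexed/iterated)
def pvNotation : List Char := ['0', '1', '2', '3']

-- change(N): q,r = divmod(N,3); return change(q)+NOTATION[r] if q else NOTATION[r].
-- NOTATION[r] never raises (0 ≤ r < 3 by Python's floor-mod with positive divisor), so .getD '0' is exact.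
-- The '0 < N' conjunct is a totality guard only: for N < 0 and q ≠ 0 Python recurses forever
-- (RecursionError); those inputs are excluded by Pre_solution_25.
def pvChange (N : Int) : List Char :=
  if h : PySem.Int.floordiv N 3 ≠ 0 ∧ 0 < N then
    pvChange (PySem.Int.floordiv N 3) ++ [(PySem.Chars.pyGet? pvNotation (PySem.Int.mod N 3)).getD '0']
  else
    [(PySem.Chars.pyGet? pvNotation (PySem.Int.mod N 3)).getD '0']
termination_by N.toNat
decreasing_by
  have h1 : PySem.Int.floordiv N 3 < N := (PySem.Int.floordiv_lt_iff_lt_mul (by omega)).mpr (by omega)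
  have h2 : (0:Int) ≤ PySem.Int.floordiv N 3 := (PySem.Int.le_floordiv_iff_mul_le (by omega)).mpr (by omega)
  omega

-- int(s) for the single digit char s: ofChars? never fails on pvNotation's chars, so .getD 0 is exact;
-- 3 ** i with the nonnegative enumerate index i is 3 ^ i.toNat.
def solution_25 (n : Int) : Int :=
  let answer := pvChange n
  (PySem.List.enumerate answer 0).foldl
    (fun result p => result + 3 ^ p.1.toNat * ((PySem.Int.ofChars? [p.2]).getD 0)) 0

-- ===== PORT B =====
-- while n > 0: n, r = divmod(n, 3); result = result * 3 + r
def pvLoopB (n result : Int) : Int :=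
  if h : 0 < n then
    pvLoopB (PySem.Int.floordiv n 3) (result * 3 + PySem.Int.mod n 3)
  else result
termination_by n.toNat
decreasing_by
  have h1 : PySem.Int.floordiv n 3 < n := (PySem.Int.floordiv_lt_iff_lt_mul (by omega)).mpr (by omega)
  have h2 : (0:Int) ≤ PySem.Int.floordiv n 3 := (PySem.Int.le_floordiv_iff_mul_le (by omega)).mpr (by omega)
  omega

def solution_25_alt (n : Int) : Int := pvLoopB n 0

-- ===== PRECONDITION & SPEC =====
-- Pre_ excludes exactly the negative n, on which A's recursion never reaches q == 0 and raises RecursionError.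
def Pre_solution_25 (n : Int) : Prop := 0 ≤ n
instance (n : Int) : Decidable (Pre_solution_25 n) := by unfold Pre_solution_25; infer_instance
def pvWitness_solution_25 : Int := (11)

def Spec_solution_25 (n : Int) (out : Int) : Prop := out = solution_25_alt n
instance (n : Int) (out : Int) : Decidable (Spec_solution_25 n out) := by unfold Spec_solution_25; infer_instance

-- ===== CLAIM (what is proved, stated in full; the proofs are below) =====
def Claim_equal_solution_25 : Prop := ∀ (n : Int), Dom_solution_25 n → Pre_solution_25 n → Spec_solution_25 n (solution_25 n)

-- ===== LEMMAS AND PROOFS =====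

-- number of iterations of B's loop (= base-3 digit count for positive n)
def pvDigLen (n : Int) : Nat :=
  if h : 0 < n then pvDigLen (PySem.Int.floordiv n 3) + 1 else 0
termination_by n.toNat
decreasing_by
  have h1 : PySem.Int.floordiv n 3 < n := (PySem.Int.floordiv_lt_iff_lt_mul (by omega)).mpr (by omega)
  have h2 : (0:Int) ≤ PySem.Int.floordiv n 3 := (PySem.Int.le_floordiv_iff_mul_le (by omega)).mpr (by omega)
  omega

lemma pvFloordiv3_bounds (n : Int) (h : 0 < n) :
    0 ≤ PySem.Int.floordiv n 3 ∧ PySem.Int.floordiv n 3 < n :=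
  ⟨(PySem.Int.le_floordiv_iff_mul_le (by omega)).mpr (by omega),
   (PySem.Int.floordiv_lt_iff_lt_mul (by omega)).mpr (by omega)⟩

lemma pvDigit_val (r : Int) (h0 : 0 ≤ r) (h3 : r < 3) :
    ((PySem.Int.ofChars? [(PySem.Chars.pyGet? pvNotation r).getD '0']).getD 0) = r := by
  interval_cases r <;> decide

lemma pvLoopB_shift (n : Int) : ∀ acc : Int,
    pvLoopB n acc = acc * 3 ^ pvDigLen n + pvLoopB n 0 := by
  induction n using pvDigLen.induct with
  | case1 n h ih =>
    intro acc
    rw [pvLoopB, dif_pos h]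
    conv_rhs => rw [pvLoopB, dif_pos h]
    rw [pvDigLen, dif_pos h, ih (acc * 3 + PySem.Int.mod n 3), ih (0 * 3 + PySem.Int.mod n 3)]
    ring
  | case2 n h =>
    intro acc
    rw [pvLoopB, dif_neg h]
    conv_rhs => rw [pvLoopB, dif_neg h]
    rw [pvDigLen, dif_neg h]
    ring

lemma pvChange_len (n : Int) (hn : 0 < n) : (pvChange n).length = pvDigLen n := by
  induction n using pvDigLen.induct with
  | case1 n h ih =>
    rw [pvChange, pvDigLen, dif_pos h]
    by_cases hq : PySem.Int.floordiv n 3 = 0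
    · rw [dif_neg (fun hc => hc.1 hq), pvDigLen, dif_neg (by omega), List.length_singleton]
    · have hq' : 0 < PySem.Int.floordiv n 3 := by
        have := (pvFloordiv3_bounds n h).1; omega
      rw [dif_pos ⟨hq, h⟩, List.length_append, ih hq', List.length_singleton]
  | case2 n h => omega

-- folding A's reweighting loop over a string with one more (last) character
lemma pvSumA_append (xs : List Char) (c : Char) :
    (PySem.List.enumerate (xs ++ [c]) 0).foldl
      (fun result p => result + 3 ^ p.1.toNat * ((PySem.Int.ofChars? [p.2]).getD 0)) 0
    = (PySem.List.enumerate xs 0).foldl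
        (fun result p => result + 3 ^ p.1.toNat * ((PySem.Int.ofChars? [p.2]).getD 0)) 0
      + 3 ^ xs.length * ((PySem.Int.ofChars? [c]).getD 0) := by
  rw [PySem.List.enumerate_append, List.foldl_append]
  simp [PySem.List.enumerate]

lemma pvMain (n : Int) (hn : 0 ≤ n) : solution_25 n = pvLoopB n 0 := by
  induction n using pvChange.induct with
  | case1 n h ih =>
    have hq' : 0 < PySem.Int.floordiv n 3 := by
      have := (pvFloordiv3_bounds n h.2).1; omega
    have hr0 : 0 ≤ PySem.Int.mod n 3 := PySem.Int.mod_nonneg _ (by omega)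
    have hr3 : PySem.Int.mod n 3 < 3 := PySem.Int.mod_lt _ (by omega)
    show (PySem.List.enumerate (pvChange n) 0).foldl _ 0 = _
    have ihq : List.foldl (fun result p => result + 3 ^ p.1.toNat * (PySem.Int.ofChars? [p.2]).getD 0) 0
        (PySem.List.enumerate (pvChange (PySem.Int.floordiv n 3)))
        = pvLoopB (PySem.Int.floordiv n 3) 0 := ih (le_of_lt hq')
    rw [pvChange, dif_pos h, pvSumA_append, pvDigit_val _ hr0 hr3, pvChange_len _ hq']
    conv_rhs => rw [pvLoopB, dif_pos h.2, pvLoopB_shift]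
    rw [ihq]
    ring
  | case2 n h =>
    by_cases hp : 0 < n
    · -- here q = 0, so 0 < n < 3: one digit
      have hq : PySem.Int.floordiv n 3 = 0 := by tauto
      have hr0 : 0 ≤ PySem.Int.mod n 3 := PySem.Int.mod_nonneg _ (by omega)
      have hr3 : PySem.Int.mod n 3 < 3 := PySem.Int.mod_lt _ (by omega)
      show (PySem.List.enumerate (pvChange n) 0).foldl _ 0 = _
      rw [pvChange, dif_neg h]
      rw [pvLoopB, dif_pos hp, pvLoopB, dif_neg (by omega)]
      simp [PySem.List.enumerate]
      simpa using pvDigit_val (PySem.Int.mod n 3) hr0 hr3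
    · have h0 : n = 0 := by omega
      subst h0
      show (PySem.List.enumerate (pvChange 0) 0).foldl _ 0 = pvLoopB 0 0
      rw [pvChange, pvLoopB]
      decide

-- ===== VERDICT (by name: the statement is the Claim_ definition above) =====
theorem solution_25_spec : Claim_equal_solution_25 := by
  intro n _ hpre
  exact pvMain n hpre
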